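-- pv_equiv track=rewrite | github.com/mirva777/proctoring | offline_moodle_dump_export.py | _safe_question_mapping
-- ===== SOURCE A (Python) =====
-- from typing import Iterable, Iterator, Optional
--
-- def _to_int(value: Optional[str], default: int = 0) -> int:
--     if value in (None, ""):
--         return default
--     try:
--         return int(value)
--     except (TypeError, ValueError):
--         return default
--
-- def _safe_question_mapping(
--     slot_rows: Iterable[dict[str, Optional[str]]],
--     question_rows: dict[int, dict[str, Optional[str]]],
--     slot_question_rows: dict[int, dict[str, Optional[str]]],
-- ) -> tuple[str, str, str, str]:
--     question_ids: list[str] = []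
--     question_slots: list[str] = []
--     question_names: list[str] = []
--     question_labels: list[str] = []
--
--     seen_ids: set[str] = set()
--     seen_slots: set[str] = set()
--     seen_names: set[str] = set()
--     seen_labels: set[str] = set()
--
--     for slot in sorted(slot_rows, key=lambda row: _to_int(row.get("slot"))):
--         slot_id = _to_int(slot.get("id"))
--         slot_num = str(slot.get("slot") or "").strip()
--         question_id = _to_int(slot.get("questionid"))
--
--         question_name = ""
--         if question_id and question_id in question_rows:
--             question_name = str(question_rows[question_id].get("name") or "").strip()
--         elif slot_id and slot_id in slot_question_rows:
--             question_id = _to_int(slot_question_rows[slot_id].get("question_id"))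
--             question_name = str(slot_question_rows[slot_id].get("question_name") or "").strip()
--
--         question_id_str = str(question_id) if question_id else ""
--         question_label = ""
--         if slot_num and question_name:
--             question_label = f"Q{slot_num}: {question_name}"
--         elif slot_num:
--             question_label = f"Q{slot_num}"
--         elif question_name:
--             question_label = question_name
--
--         if question_id_str and question_id_str not in seen_ids:
--             question_ids.append(question_id_str)
--             seen_ids.add(question_id_str)
--         if slot_num and slot_num not in seen_slots:
--             question_slots.append(slot_num)
--             seen_slots.add(slot_num)
--         if question_name and question_name not in seen_names:
--             question_names.append(question_name)
--             seen_names.add(question_name)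
--         if question_label and question_label not in seen_labels:
--             question_labels.append(question_label)
--             seen_labels.add(question_label)
--
--     return (
--         ",".join(question_ids),
--         ",".join(question_slots),
--         " | ".join(question_labels),
--         " | ".join(question_names),
--     )
-- ===== SOURCE B (Python) =====
-- from typing import Optional
--
--
-- def _to_int(value: Optional[str], default: int = 0) -> int:
--     if value in (None, ""):
--         return default
--     try:
--         return int(value)
--     except (TypeError, ValueError):
--         return default
--
--
-- def _row_values(slot, question_rows, slot_question_rows):
--     slot_id = _to_int(slot.get("id"))
--     slot_num = str(slot.get("slot") or "").strip()
--     question_id = _to_int(slot.get("questionid"))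
--
--     question_name = ""
--     if question_id and question_id in question_rows:
--         question_name = str(question_rows[question_id].get("name") or "").strip()
--     elif slot_id and slot_id in slot_question_rows:
--         question_id = _to_int(slot_question_rows[slot_id].get("question_id"))
--         question_name = str(slot_question_rows[slot_id].get("question_name") or "").strip()
--
--     question_id_str = str(question_id) if question_id else ""
--     if slot_num and question_name:
--         question_label = f"Q{slot_num}: {question_name}"
--     elif slot_num:
--         question_label = f"Q{slot_num}"
--     else:
--         question_label = question_name
--     return question_id_str, slot_num, question_name, question_label
--
--
-- def _safe_question_mapping(slot_rows, question_rows, slot_question_rows):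
--     vals = [_row_values(row, question_rows, slot_question_rows)
--             for row in sorted(slot_rows, key=lambda row: _to_int(row.get("slot")))]
--     ids = [v[0] for v in vals]
--     slots = [v[1] for v in vals]
--     names = [v[2] for v in vals]
--     labels = [v[3] for v in vals]
--
--     def uniq(xs):
--         # stateless first-occurrence dedup of the non-empty entries: keep x
--         # exactly when no equal entry occurs before it
--         return [x for i, x in enumerate(xs) if x and x not in xs[:i]]
--
--     return (",".join(uniq(ids)), ",".join(uniq(slots)),
--             " | ".join(uniq(labels)), " | ".join(uniq(names)))
-- ===== Notes on version B (the rewrite author's own statement) =====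
-- stated objective: alternative
-- what changed: A's single stateful loop interleaving four seen-sets and four conditional appends is replaced by a stateless pipeline: sort, map each row to its four raw strings, split into columns, then keep each non-empty entry exactly when no equal entry occurs before it (a prefix-membership scan, no auxiliary sets); trades the hash sets for quadratic prefix scans during dedup.
import Mathlib
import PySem

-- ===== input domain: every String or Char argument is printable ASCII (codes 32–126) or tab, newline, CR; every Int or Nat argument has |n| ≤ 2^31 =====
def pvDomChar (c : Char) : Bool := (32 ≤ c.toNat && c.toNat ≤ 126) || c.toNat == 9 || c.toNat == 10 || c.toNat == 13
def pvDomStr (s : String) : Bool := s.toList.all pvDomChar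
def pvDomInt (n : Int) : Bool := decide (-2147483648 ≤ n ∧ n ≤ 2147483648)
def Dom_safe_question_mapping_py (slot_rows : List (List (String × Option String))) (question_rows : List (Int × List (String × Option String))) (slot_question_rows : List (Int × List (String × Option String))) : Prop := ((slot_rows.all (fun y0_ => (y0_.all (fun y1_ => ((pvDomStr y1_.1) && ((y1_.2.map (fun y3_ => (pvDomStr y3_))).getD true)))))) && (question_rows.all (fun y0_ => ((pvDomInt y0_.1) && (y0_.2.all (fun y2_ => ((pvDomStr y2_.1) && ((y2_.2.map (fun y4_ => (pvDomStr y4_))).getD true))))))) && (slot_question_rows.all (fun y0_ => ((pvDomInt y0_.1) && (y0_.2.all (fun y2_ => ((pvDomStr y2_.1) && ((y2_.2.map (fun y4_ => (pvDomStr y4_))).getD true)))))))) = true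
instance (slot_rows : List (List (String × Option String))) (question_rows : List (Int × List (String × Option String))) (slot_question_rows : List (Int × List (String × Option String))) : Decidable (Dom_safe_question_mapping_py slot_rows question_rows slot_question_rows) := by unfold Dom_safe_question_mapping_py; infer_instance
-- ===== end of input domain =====

-- B replaces A's stateful loop (four seen-sets + four accumulators updated in step) by a
-- stateless pipeline: sort, map each row to its four strings, split into columns, then keep
-- each non-empty entry exactly when no equal entry precedes it (prefix-membership test, no sets).

-- shared helper: Python's _to_int (default 0), defined in the same module and used by both versions
def to_int (v : Option String) : Int :=
  match v with
  | none => 0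
  | some s => if s = "" then 0 else (PySem.Int.ofStr? s).getD 0

-- shared helper: row.get(k) on a dict[str, Optional[str]] (missing key -> None)
def sget (row : List (String × Option String)) (k : String) : Option String :=
  ((PySem.Dict.mk row).get? k).join

-- ===== PORT A =====
structure StA where
  ids : List String
  slots : List String
  names : List String
  labels : List String
  seenI : PySem.Set String
  seenS : PySem.Set String
  seenN : PySem.Set String
  seenL : PySem.Set String

-- the body of A's for-loop, step for step
def stepA (question_rows : List (Int × List (String × Option String))) (slot_question_rows : List (Int × List (String × Option String))) (st : StA) (slot : List (String × Option String)) : StA :=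
  let slot_id := to_int (sget slot "id")
  let slot_num := PySem.Str.strip ((sget slot "slot").getD "")
  let qid0 := to_int (sget slot "questionid")
  let qn : Int × String :=
    if qid0 ≠ 0 ∧ (PySem.Dict.mk question_rows).contains qid0 = true then
      (qid0, PySem.Str.strip ((sget (((PySem.Dict.mk question_rows).get? qid0).getD []) "name").getD ""))
    else if slot_id ≠ 0 ∧ (PySem.Dict.mk slot_question_rows).contains slot_id = true then
      (to_int (sget (((PySem.Dict.mk slot_question_rows).get? slot_id).getD []) "question_id"),
       PySem.Str.strip ((sget (((PySem.Dict.mk slot_question_rows).get? slot_id).getD []) "question_name").getD ""))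
    else (qid0, "")
  let question_id := qn.1
  let question_name := qn.2
  let question_id_str := if question_id ≠ 0 then PySem.Int.toStr question_id else ""
  let question_label :=
    if slot_num ≠ "" ∧ question_name ≠ "" then PySem.Str.join "" ["Q", slot_num, ": ", question_name]
    else if slot_num ≠ "" then PySem.Str.join "" ["Q", slot_num]
    else question_name
  let st := if question_id_str ≠ "" ∧ ¬ (PySem.Set.contains st.seenI question_id_str = true)
    then { st with ids := st.ids ++ [question_id_str], seenI := PySem.Set.add st.seenI question_id_str } else st
  let st := if slot_num ≠ "" ∧ ¬ (PySem.Set.contains st.seenS slot_num = true)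
    then { st with slots := st.slots ++ [slot_num], seenS := PySem.Set.add st.seenS slot_num } else st
  let st := if question_name ≠ "" ∧ ¬ (PySem.Set.contains st.seenN question_name = true)
    then { st with names := st.names ++ [question_name], seenN := PySem.Set.add st.seenN question_name } else st
  let st := if question_label ≠ "" ∧ ¬ (PySem.Set.contains st.seenL question_label = true)
    then { st with labels := st.labels ++ [question_label], seenL := PySem.Set.add st.seenL question_label } else st
  st

def safe_question_mapping_py (slot_rows : List (List (String × Option String))) (question_rows : List (Int × List (String × Option String))) (slot_question_rows : List (Int × List (String × Option String))) : String × String × String × String :=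
  let sortedRows := PySem.List.sorted slot_rows (fun row => to_int (sget row "slot"))
  let fin := sortedRows.foldl (stepA question_rows slot_question_rows) ⟨[], [], [], [], PySem.Set.empty, PySem.Set.empty, PySem.Set.empty, PySem.Set.empty⟩
  (PySem.Str.join "," fin.ids, PySem.Str.join "," fin.slots,
   PySem.Str.join " | " fin.labels, PySem.Str.join " | " fin.names)

-- ===== PORT B =====
-- B's helper _row_values: the four raw strings of one slot row
def rowValsB (question_rows : List (Int × List (String × Option String))) (slot_question_rows : List (Int × List (String × Option String))) (slot : List (String × Option String)) : String × String × String × String :=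
  let slot_id := to_int (sget slot "id")
  let slot_num := PySem.Str.strip ((sget slot "slot").getD "")
  let qid0 := to_int (sget slot "questionid")
  let qn : Int × String :=
    if qid0 ≠ 0 ∧ (PySem.Dict.mk question_rows).contains qid0 = true then
      (qid0, PySem.Str.strip ((sget (((PySem.Dict.mk question_rows).get? qid0).getD []) "name").getD ""))
    else if slot_id ≠ 0 ∧ (PySem.Dict.mk slot_question_rows).contains slot_id = true then
      (to_int (sget (((PySem.Dict.mk slot_question_rows).get? slot_id).getD []) "question_id"),
       PySem.Str.strip ((sget (((PySem.Dict.mk slot_question_rows).get? slot_id).getD []) "question_name").getD ""))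
    else (qid0, "")
  let question_id := qn.1
  let question_name := qn.2
  let question_id_str := if question_id ≠ 0 then PySem.Int.toStr question_id else ""
  let question_label :=
    if slot_num ≠ "" ∧ question_name ≠ "" then PySem.Str.join "" ["Q", slot_num, ": ", question_name]
    else if slot_num ≠ "" then PySem.Str.join "" ["Q", slot_num]
    else question_name
  (question_id_str, slot_num, question_name, question_label)

-- B's uniq: [x for i, x in enumerate(xs) if x and x not in xs[:i]]
def uniqB (xs : List String) : List String :=
  (PySem.List.enumerate xs 0).filterMap (fun p =>
    if p.2 ≠ "" ∧ p.2 ∉ PySem.List.slice xs none (some p.1) then some p.2 else none)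

def safe_question_mapping_py_alt (slot_rows : List (List (String × Option String))) (question_rows : List (Int × List (String × Option String))) (slot_question_rows : List (Int × List (String × Option String))) : String × String × String × String :=
  let vals := (PySem.List.sorted slot_rows (fun row => to_int (sget row "slot"))).map
    (rowValsB question_rows slot_question_rows)
  let ids := vals.map (fun v => v.1)
  let slots := vals.map (fun v => v.2.1)
  let names := vals.map (fun v => v.2.2.1)
  let labels := vals.map (fun v => v.2.2.2)
  (PySem.Str.join "," (uniqB ids), PySem.Str.join "," (uniqB slots),
   PySem.Str.join " | " (uniqB labels), PySem.Str.join " | " (uniqB names))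

-- ===== PRECONDITION & SPEC =====
def Spec_safe_question_mapping_py (slot_rows : List (List (String × Option String))) (question_rows : List (Int × List (String × Option String))) (slot_question_rows : List (Int × List (String × Option String))) (out : String × String × String × String) : Prop := out = safe_question_mapping_py_alt slot_rows question_rows slot_question_rows
instance (slot_rows : List (List (String × Option String))) (question_rows : List (Int × List (String × Option String))) (slot_question_rows : List (Int × List (String × Option String))) (out : String × String × String × String) : Decidable (Spec_safe_question_mapping_py slot_rows question_rows slot_question_rows out) := by unfold Spec_safe_question_mapping_py; infer_instance

-- ===== CLAIM (what is proved, stated in full; the proofs are below) =====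
def Claim_equal_safe_question_mapping_py : Prop := ∀ (slot_rows : List (List (String × Option String))) (question_rows : List (Int × List (String × Option String))) (slot_question_rows : List (Int × List (String × Option String))), Dom_safe_question_mapping_py slot_rows question_rows slot_question_rows → Spec_safe_question_mapping_py slot_rows question_rows slot_question_rows (safe_question_mapping_py slot_rows question_rows slot_question_rows)

-- ===== LEMMAS AND PROOFS =====

-- the one-channel step A performs on a (list, seen) pair with list = seen
def uStep (s : List String) (x : String) : List String :=
  if x ≠ "" ∧ ¬ (PySem.Set.contains s x = true) then s ++ [x] else s

-- A's four sequential conditional updates, abstracted over the four row strings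
def updA (st : StA) (v : String × String × String × String) : StA :=
  let st := if v.1 ≠ "" ∧ ¬ (PySem.Set.contains st.seenI v.1 = true)
    then { st with ids := st.ids ++ [v.1], seenI := PySem.Set.add st.seenI v.1 } else st
  let st := if v.2.1 ≠ "" ∧ ¬ (PySem.Set.contains st.seenS v.2.1 = true)
    then { st with slots := st.slots ++ [v.2.1], seenS := PySem.Set.add st.seenS v.2.1 } else st
  let st := if v.2.2.1 ≠ "" ∧ ¬ (PySem.Set.contains st.seenN v.2.2.1 = true)
    then { st with names := st.names ++ [v.2.2.1], seenN := PySem.Set.add st.seenN v.2.2.1 } else st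
  let st := if v.2.2.2 ≠ "" ∧ ¬ (PySem.Set.contains st.seenL v.2.2.2 = true)
    then { st with labels := st.labels ++ [v.2.2.2], seenL := PySem.Set.add st.seenL v.2.2.2 } else st
  st

theorem stepA_shape (qr sqr : List (Int × List (String × Option String))) (st : StA) (slot : List (String × Option String)) :
    stepA qr sqr st slot = updA st (rowValsB qr sqr slot) := rfl

theorem updA_eq (a b c d : List String) (v : String × String × String × String) :
    updA ⟨a, b, c, d, a, b, c, d⟩ v =
      ⟨uStep a v.1, uStep b v.2.1, uStep c v.2.2.1, uStep d v.2.2.2,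
       uStep a v.1, uStep b v.2.1, uStep c v.2.2.1, uStep d v.2.2.2⟩ := by
  obtain ⟨x1, x2, x3, x4⟩ := v
  simp only [updA, uStep]
  split_ifs with h1 h2 h3 h4 <;> simp_all [PySem.Set.add]

-- A's fold, started with seen-sets equal to the lists, keeps them equal and folds each channel with uStep
theorem foldA_eq (qr sqr : List (Int × List (String × Option String))) (ss : List (List (String × Option String))) :
    ∀ a b c d : List String,
    ss.foldl (stepA qr sqr) ⟨a, b, c, d, a, b, c, d⟩ =
      ⟨(ss.map (fun r => (rowValsB qr sqr r).1)).foldl uStep a,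
       (ss.map (fun r => (rowValsB qr sqr r).2.1)).foldl uStep b,
       (ss.map (fun r => (rowValsB qr sqr r).2.2.1)).foldl uStep c,
       (ss.map (fun r => (rowValsB qr sqr r).2.2.2)).foldl uStep d,
       (ss.map (fun r => (rowValsB qr sqr r).1)).foldl uStep a,
       (ss.map (fun r => (rowValsB qr sqr r).2.1)).foldl uStep b,
       (ss.map (fun r => (rowValsB qr sqr r).2.2.1)).foldl uStep c,
       (ss.map (fun r => (rowValsB qr sqr r).2.2.2)).foldl uStep d⟩ := by
  induction ss with
  | nil => intro a b c d; rfl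
  | cons r rs ih =>
    intro a b c d
    simp only [List.foldl_cons, List.map_cons, stepA_shape, updA_eq, ih]

-- one snoc step of the first-occurrence dedup of the non-empty entries
def keepNew (ys : List String) (y : String) : List String :=
  if y ≠ "" ∧ y ∉ ys then [y] else []

-- membership in A's channel fold: the non-empty elements seen so far
theorem mem_foldl_uStep (ys : List String) : ∀ (s : List String) (x : String),
    x ∈ ys.foldl uStep s ↔ x ∈ s ∨ (x ∈ ys ∧ x ≠ "") := by
  induction ys with
  | nil => simp
  | cons z zs ih =>
    intro s x
    simp only [List.foldl_cons, ih, List.mem_cons]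
    by_cases hz : z = "" <;> by_cases hc : z ∈ s <;>
      simp only [uStep, hz] <;> simp_all <;> aesop

-- A's channel fold satisfies the snoc recursion
theorem foldl_uStep_snoc (ys : List String) (y : String) :
    (ys ++ [y]).foldl uStep [] = ys.foldl uStep [] ++ keepNew ys y := by
  rw [List.foldl_append]
  by_cases hy : y = ""
  · simp [uStep, keepNew, hy]
  · by_cases hm : y ∈ ys
    · have : y ∈ ys.foldl uStep [] := (mem_foldl_uStep ys [] y).mpr (Or.inr ⟨hm, hy⟩)
      simp [uStep, keepNew, hy, hm, this]
    · have : y ∉ ys.foldl uStep [] := by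
        intro h; rcases (mem_foldl_uStep ys [] y).mp h with h | h <;> simp_all
      simp [uStep, keepNew, hy, hm, this]

-- B's uniq satisfies the same snoc recursion
theorem uniqB_snoc (ys : List String) (y : String) :
    uniqB (ys ++ [y]) = uniqB ys ++ keepNew ys y := by
  unfold uniqB
  rw [PySem.List.enumerate_append, List.filterMap_append]
  congr 1
  · apply List.filterMap_congr
    intro p hp
    rcases (PySem.List.mem_enumerate_iff ys 0 p).mp hp with ⟨k, hk, rfl⟩
    have hsl : PySem.List.slice (ys ++ [y]) none (some ((0:Int) + (k:Int))) =
        PySem.List.slice ys none (some ((0:Int) + (k:Int))) := by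
      rw [zero_add, PySem.List.slice_to_natCast, PySem.List.slice_to_natCast,
        List.take_append_of_le_length (le_of_lt hk)]
    rw [hsl]
  · simp only [PySem.List.enumerate, List.filterMap_cons, List.filterMap_nil]
    have hsl : PySem.List.slice (ys ++ [y]) none (some ((0:Int) + (ys.length:Int))) = ys := by
      rw [zero_add, PySem.List.slice_to_natCast, List.take_left]
    rw [hsl]
    unfold keepNew
    split_ifs <;> simp_all

theorem uniqB_eq_foldl_uStep (ys : List String) : uniqB ys = ys.foldl uStep [] := by
  induction ys using List.reverseRecOn with
  | nil => rfl
  | append_singleton zs z ih => rw [uniqB_snoc, foldl_uStep_snoc, ih]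

-- ===== VERDICT (by name: the statement is the Claim_ definition above) =====
theorem safe_question_mapping_py_spec : Claim_equal_safe_question_mapping_py := by
  intro slot_rows question_rows slot_question_rows _
  unfold Spec_safe_question_mapping_py safe_question_mapping_py safe_question_mapping_py_alt
  simp only [PySem.Set.empty, foldA_eq, uniqB_eq_foldl_uStep, List.map_map, Function.comp_def]
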